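-- pv_equiv track=rewrite | github.com/gonka-ai/gonka | packages/train/tests/api_test.py | map_ports
-- ===== SOURCE A (Python) =====
-- def map_ports(addresses, start_port):
--     port_map = {}
--     ports = []
--     for addr in addresses:
--         if addr not in port_map:
--             port_map[addr] = start_port
--         else:
--             port_map[addr] += 1
--         ports.append(port_map[addr])
--     return ports
-- ===== SOURCE B (Python) =====
-- def map_ports(addresses, start_port):
--     addrs = list(addresses)
--     groups = {}
--     for i, a in enumerate(addrs):
--         groups.setdefault(a, []).append(i)
--     ports = [0] * len(addrs)
--     for idxs in groups.values():
--         for k, i in enumerate(idxs):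
--             ports[i] = start_port + k
--     return ports
-- ===== Notes on version B (the rewrite author's own statement) =====
-- stated objective: alternative
-- what changed: Instead of one pass with an incrementing per-address counter, B first groups all occurrence indices by address into a dict, then scatters start_port+k into a preallocated output list at the k-th index of each group.
import Mathlib
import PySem

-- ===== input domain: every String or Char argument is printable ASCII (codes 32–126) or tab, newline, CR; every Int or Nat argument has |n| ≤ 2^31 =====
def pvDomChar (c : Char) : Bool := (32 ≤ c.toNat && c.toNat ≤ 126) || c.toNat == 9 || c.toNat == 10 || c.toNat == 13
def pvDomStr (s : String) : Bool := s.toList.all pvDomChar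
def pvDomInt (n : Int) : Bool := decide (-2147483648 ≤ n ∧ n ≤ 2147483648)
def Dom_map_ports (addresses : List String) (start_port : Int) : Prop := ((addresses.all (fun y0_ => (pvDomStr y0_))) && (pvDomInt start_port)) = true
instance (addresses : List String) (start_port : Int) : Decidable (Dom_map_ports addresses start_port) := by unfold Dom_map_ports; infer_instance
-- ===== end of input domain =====

-- B replaces A's single counting pass by group-then-scatter: collect each address's
-- occurrence indices in one dict pass, then write start_port+k at each group's k-th index
-- into a preallocated output (alternative decomposition, same cost).

-- ===== PORT A =====
-- literal transliteration of A: a dict accumulator plus an output list, one pass.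
-- 'ports.append(port_map[addr])': addr was just inserted/updated, so the key is always
-- present and 'getD addr 0' is exact (the default is never read).
def map_ports (addresses : List String) (start_port : Int) : List Int :=
  (addresses.foldl
    (fun (st : PySem.Dict String Int × List Int) addr =>
      let pm := if st.1.contains addr = false
                then st.1.insert addr start_port
                else st.1.modify addr 0 (· + 1)
      (pm, st.2 ++ [pm.getD addr 0]))
    (PySem.Dict.empty, [])).2

-- ===== PORT B =====
-- B-side helper: the grouping pass 'groups.setdefault(a, []).append(i)' over enumerate(addrs);
-- setdefault-then-append is exactly Dict.modify with default [] (key appended on first sight).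
def pvGroups (addrs : List String) : PySem.Dict String (List Int) :=
  (PySem.List.enumerate addrs).foldl
    (fun (g : PySem.Dict String (List Int)) p => g.modify p.2 [] (· ++ [p.1]))
    PySem.Dict.empty

-- literal transliteration of B: group indices by address, then scatter start_port+k into
-- 'ports = [0] * len(addrs)'; 'ports[i] = …' is pySetD (i is always a valid index).
def map_ports_alt (addresses : List String) (start_port : Int) : List Int :=
  (pvGroups addresses).values.foldl
    (fun ports idxs =>
      (PySem.List.enumerate idxs).foldl
        (fun (ports : List Int) q => PySem.List.pySetD ports q.2 (start_port + q.1))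
        ports)
    (List.replicate addresses.length 0)

-- ===== PRECONDITION & SPEC =====
def Spec_map_ports (addresses : List String) (start_port : Int) (out : List Int) : Prop := out = map_ports_alt addresses start_port
instance (addresses : List String) (start_port : Int) (out : List Int) : Decidable (Spec_map_ports addresses start_port out) := by unfold Spec_map_ports; infer_instance

-- ===== CLAIM (what is proved, stated in full; the proofs are below) =====
def Claim_equal_map_ports : Prop := ∀ (addresses : List String) (start_port : Int), Dom_map_ports addresses start_port → Spec_map_ports addresses start_port (map_ports addresses start_port)

-- ===== LEMMAS AND PROOFS =====

-- Common specification both ports are reduced to: position j gets start_port + (#occurrences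
-- of addresses[j] among the first j entries).
def pvSpec (l : List String) (sp : Int) : List Int :=
  (PySem.List.enumerate l).map
    (fun p => sp + (PySem.List.count (PySem.List.slice l none (some p.1)) p.2 : Int))

-- The list of indices at which address a occurs in l (as B's dict stores it).
def pvIdx (l : List String) (a : String) : List Int :=
  ((PySem.List.enumerate l).filter (fun p => p.2 == a)).map (·.1)

lemma pvSpec_append (l : List String) (x : String) (sp : Int) :
    pvSpec (l ++ [x]) sp = pvSpec l sp ++ [sp + (List.count x l : Int)] := by
  unfold pvSpec
  rw [PySem.List.enumerate_append, List.map_append]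
  congr 1
  · refine List.map_congr_left ?_
    intro p hp
    rcases (PySem.List.mem_enumerate_iff _ _ _).1 hp with ⟨k, hk, rfl⟩
    simp only [zero_add]
    have h1 : PySem.List.slice (l ++ [x]) none (some (k : Int)) = (l ++ [x]).take k :=
      PySem.List.slice_to_natCast _ _
    have h2 : PySem.List.slice l none (some (k : Int)) = l.take k :=
      PySem.List.slice_to_natCast _ _
    rw [h1, h2, List.take_append_of_le_length (Nat.le_of_lt hk)]
  · simp only [PySem.List.enumerate, zero_add]
    have h1 : PySem.List.slice (l ++ [x]) none (some ((l.length : Int))) = (l ++ [x]).take l.length :=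
      PySem.List.slice_to_natCast _ _
    simp [h1, PySem.List.count_eq]

-- Combined invariant of A's fold: the output list so far is pvSpec on the prefix, and the
-- dict maps each address a it has seen to start_port + (count of a so far) - 1.
lemma map_ports_fold_inv (sp : Int) (l : List String) :
    ((l.foldl
      (fun (st : PySem.Dict String Int × List Int) addr =>
        let pm := if st.1.contains addr = false
                  then st.1.insert addr sp
                  else st.1.modify addr 0 (· + 1)
        (pm, st.2 ++ [pm.getD addr 0]))
      (PySem.Dict.empty, [])).2 = pvSpec l sp)
    ∧ ∀ a : String,
        ((l.foldl
          (fun (st : PySem.Dict String Int × List Int) addr =>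
            let pm := if st.1.contains addr = false
                      then st.1.insert addr sp
                      else st.1.modify addr 0 (· + 1)
            (pm, st.2 ++ [pm.getD addr 0]))
          (PySem.Dict.empty, [])).1.contains a = decide (0 < List.count a l))
        ∧ ((l.foldl
          (fun (st : PySem.Dict String Int × List Int) addr =>
            let pm := if st.1.contains addr = false
                      then st.1.insert addr sp
                      else st.1.modify addr 0 (· + 1)
            (pm, st.2 ++ [pm.getD addr 0]))
          (PySem.Dict.empty, [])).1.getD a 0
          = if 0 < List.count a l then sp + (List.count a l : Int) - 1 else 0) := by
  induction l using List.reverseRecOn with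
  | nil =>
    refine ⟨rfl, fun a => ⟨by simp [PySem.Dict.contains_empty], by simp [PySem.Dict.getD_empty]⟩⟩
  | append_singleton l x ih =>
    obtain ⟨hacc, hinv⟩ := ih
    rw [List.foldl_append] at *
    simp only [List.foldl_cons, List.foldl_nil]
    have hcount : ∀ a : String, a ≠ x → List.count a (l ++ [x]) = List.count a l := by
      intro a hax
      simp [List.count_append, Ne.symm hax]
    have hcountx : List.count x (l ++ [x]) = List.count x l + 1 := by
      simp [List.count_append]
    by_cases hc : 0 < List.count x l
    · -- x already seen: the 'modify' branch runs
      have hcond : ((l.foldl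
          (fun (st : PySem.Dict String Int × List Int) addr =>
            let pm := if st.1.contains addr = false
                      then st.1.insert addr sp
                      else st.1.modify addr 0 (· + 1)
            (pm, st.2 ++ [pm.getD addr 0]))
          (PySem.Dict.empty, [])).1.contains x = false) = False := by
        rw [(hinv x).1, decide_eq_true hc]; simp
      simp only [hcond, if_false]
      refine ⟨?_, fun a => ⟨?_, ?_⟩⟩
      · rw [pvSpec_append, ← hacc]
        rw [PySem.Dict.getD_modify_self, (hinv x).2, if_pos hc]
        congr 2
        omega
      · rw [PySem.Dict.contains_modify, (hinv a).1]
        by_cases hax : a = x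
        · subst hax; rw [hcountx]; simp
        · rw [hcount a hax]
          simp [hax]
      · rw [PySem.Dict.getD_modify]
        by_cases hax : a = x
        · subst hax
          rw [if_pos rfl, (hinv a).2, if_pos hc, hcountx, if_pos (by omega)]
          push_cast
          ring
        · rw [if_neg hax, (hinv a).2, hcount a hax]
    · -- x not yet seen: the 'insert' branch runs
      have hcond : ((l.foldl
          (fun (st : PySem.Dict String Int × List Int) addr =>
            let pm := if st.1.contains addr = false
                      then st.1.insert addr sp
                      else st.1.modify addr 0 (· + 1)
            (pm, st.2 ++ [pm.getD addr 0]))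
          (PySem.Dict.empty, [])).1.contains x = false) = True := by
        rw [(hinv x).1, decide_eq_false hc]; simp
      simp only [hcond, if_true]
      have h0 : List.count x l = 0 := by omega
      refine ⟨?_, fun a => ⟨?_, ?_⟩⟩
      · rw [pvSpec_append, ← hacc, PySem.Dict.getD_insert_self, h0]
        simp
      · rw [PySem.Dict.contains_insert, (hinv a).1]
        by_cases hax : a = x
        · subst hax; rw [hcountx]; simp
        · rw [hcount a hax]
          simp [hax]
      · rw [PySem.Dict.getD_insert]
        by_cases hax : a = x
        · subst hax
          rw [if_pos rfl, hcountx, h0, if_pos (by omega)]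
          simp
        · rw [if_neg hax, (hinv a).2, hcount a hax]

lemma map_ports_eq_pvSpec (l : List String) (sp : Int) : map_ports l sp = pvSpec l sp :=
  (map_ports_fold_inv sp l).1

-- ===== B-side lemmas =====

lemma pvGroups_getD (l : List String) (a : String) :
    (pvGroups l).getD a [] = pvIdx l a := by
  have h := PySem.Dict.getD_foldl_modify_append
    (l := (PySem.List.enumerate l).map Prod.swap)
    (d := (PySem.Dict.empty : PySem.Dict String (List Int))) (c := a)
  rw [List.foldl_map] at h
  simp only [Prod.fst_swap, Prod.snd_swap, List.filter_map, Function.comp_def, List.map_map,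
    PySem.Dict.getD_empty, List.nil_append] at h
  exact h

lemma pvGroups_keys_nodup (l : List String) : (pvGroups l).keys.Nodup :=
  PySem.Dict.nodup_keys_foldl_modify_key _ _ _ _ _ PySem.Dict.nodup_keys_empty

lemma mem_pvGroups_keys (l : List String) (a : String) :
    a ∈ (pvGroups l).keys ↔ a ∈ l := by
  unfold pvGroups
  rw [PySem.Dict.keys_foldl_modify_key]
  simp [PySem.Set.mem_update, PySem.List.map_snd_enumerate]

lemma mem_pvIdx (l : List String) (a : String) (i : Int) :
    i ∈ pvIdx l a ↔ ∃ (k : Nat) (h : k < l.length), i = (k : Int) ∧ l[k] = a := by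
  unfold pvIdx
  simp only [List.mem_map, List.mem_filter]
  constructor
  · rintro ⟨p, ⟨hp, hpa⟩, rfl⟩
    rcases (PySem.List.mem_enumerate_iff _ _ _).1 hp with ⟨k, hk, rfl⟩
    have hka : l[k] = a := by simpa using beq_iff_eq.mp hpa
    exact ⟨k, hk, by simp, hka⟩
  · rintro ⟨k, hk, rfl, hka⟩
    exact ⟨((k : Int), l[k]), ⟨(PySem.List.mem_enumerate_iff _ _ _).2 ⟨k, hk, by simp⟩,
      beq_iff_eq.mpr hka⟩, rfl⟩

lemma natCast_mem_pvIdx (l : List String) (a : String) (j : Nat) (hj : j < l.length) :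
    ((j : Int) ∈ pvIdx l a ↔ l[j] = a) := by
  rw [mem_pvIdx]
  constructor
  · rintro ⟨k, hk, hkj, hka⟩
    have : k = j := by exact_mod_cast hkj.symm
    subst this; exact hka
  · intro h; exact ⟨j, hj, rfl, h⟩

lemma pvIdx_bounds (l : List String) (a : String) (i : Int) (hi : i ∈ pvIdx l a) :
    0 ≤ i ∧ i.toNat < l.length := by
  rcases (mem_pvIdx l a i).1 hi with ⟨k, hk, rfl, _⟩
  constructor <;> simp [hk]

lemma pvIdx_nodup (l : List String) (a : String) : (pvIdx l a).Nodup := by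
  unfold pvIdx
  have hpw : ((PySem.List.enumerate l).filter (fun p => p.2 == a)).Pairwise
      (fun p q => p.1 < q.1) :=
    (PySem.List.pairwise_lt_enumerate l 0).filter _
  exact (hpw.map _ (by intro p q h; exact h)).imp (fun h => ne_of_lt h)

lemma pvIdx_append (l : List String) (x a : String) :
    pvIdx (l ++ [x]) a = pvIdx l a ++ (if x = a then [(l.length : Int)] else []) := by
  unfold pvIdx
  rw [PySem.List.enumerate_append, List.filter_append, List.map_append]
  congr 1
  simp only [PySem.List.enumerate, zero_add]
  by_cases hxa : x = a <;> simp [hxa]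

lemma pvIdx_length (l : List String) (a : String) :
    (pvIdx l a).length = l.count a := by
  induction l using List.reverseRecOn with
  | nil => simp [pvIdx, PySem.List.enumerate]
  | append_singleton l x ih =>
      rw [pvIdx_append, List.length_append, ih, List.count_append]
      by_cases hxa : x = a <;> simp [hxa]

-- idxOf of a freshly appended element (general form of what both scatter proofs need)
lemma pvIdxOf_append_self {α : Type} [BEq α] [LawfulBEq α] (u : List α) (x : α) (h : x ∉ u) :
    (u ++ [x]).idxOf x = u.length := by
  simp [List.idxOf_append, h]

lemma pvIdx_idxOf (l : List String) (a : String) (j : Nat) (hj : j < l.length)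
    (ha : l[j] = a) : (pvIdx l a).idxOf ((j : Int)) = (l.take j).count a := by
  induction l using List.reverseRecOn with
  | nil => simp at hj
  | append_singleton l x ih =>
      rw [pvIdx_append]
      rcases Nat.lt_or_ge j l.length with hlt | hge
      · have haj : l[j] = a := by
          have := ha; rwa [List.getElem_append_left hlt] at this
        have hmem : (j : Int) ∈ pvIdx l a := (natCast_mem_pvIdx l a j hlt).2 haj
        rw [List.idxOf_append_of_mem hmem, List.take_append_of_le_length (Nat.le_of_lt hlt),
          ih hlt haj]
      · have hj' : j = l.length := by
          have : j < l.length + 1 := by simpa using hj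
          omega
        subst hj'
        have hx : x = a := by simpa using ha
        subst hx
        have hnm : ((l.length : Int)) ∉ pvIdx l x := by
          intro hmem
          exact absurd (pvIdx_bounds l x _ hmem).2 (by simp)
        rw [if_pos rfl, pvIdxOf_append_self _ _ hnm]
        simp [pvIdx_length, List.take_left']

-- scatter lemmas: the inner loop 'for k, i in enumerate(idxs): ports[i] = sp + k'
lemma inner_length (sp : Int) (g : List Int) (s : Int) (o : List Int) :
    ((PySem.List.enumerate g s).foldl
      (fun (ports : List Int) q => PySem.List.pySetD ports q.2 (sp + q.1)) o).length
      = o.length := by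
  induction g generalizing s o with
  | nil => simp [PySem.List.enumerate]
  | cons x g ih =>
      rw [PySem.List.enumerate_cons, List.foldl_cons, ih]
      exact PySem.List.length_pySetD _ _ _

lemma inner_untouched (sp : Int) (g : List Int) (s : Int) (o : List Int) (j : Nat)
    (hb : ∀ i ∈ g, 0 ≤ i) (hj : (j : Int) ∉ g) :
    ((PySem.List.enumerate g s).foldl
      (fun (ports : List Int) q => PySem.List.pySetD ports q.2 (sp + q.1)) o)[j]?
      = o[j]? := by
  induction g generalizing s o with
  | nil => simp [PySem.List.enumerate]
  | cons x g ih =>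
      rw [PySem.List.enumerate_cons, List.foldl_cons,
        ih _ _ (fun i hi => hb i (List.mem_cons_of_mem _ hi)) (fun h => hj (List.mem_cons_of_mem _ h))]
      have hx0 : 0 ≤ x := hb x List.mem_cons_self
      rw [PySem.List.pySetD_of_nonneg _ _ hx0, List.getElem?_set]
      have hne : x.toNat ≠ j := by
        intro h
        apply hj
        have : x = (j : Int) := by omega
        simp [← this]
      simp [hne]

lemma inner_get (sp : Int) (g : List Int) (o : List Int) (j : Nat)
    (hb : ∀ i ∈ g, 0 ≤ i ∧ i.toNat < o.length) (hnd : g.Nodup) (hmem : (j : Int) ∈ g) :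
    ((PySem.List.enumerate g).foldl
      (fun (ports : List Int) q => PySem.List.pySetD ports q.2 (sp + q.1)) o)[j]?
      = some (sp + ((g.idxOf ((j : Int)) : Nat) : Int)) := by
  induction g using List.reverseRecOn with
  | nil => simp at hmem
  | append_singleton g x ih =>
      rw [PySem.List.enumerate_append, List.foldl_append]
      simp only [PySem.List.enumerate, zero_add, List.foldl_cons, List.foldl_nil]
      have hx := hb x (by simp)
      have hlen : ((PySem.List.enumerate g).foldl
          (fun (ports : List Int) q => PySem.List.pySetD ports q.2 (sp + q.1)) o).length
          = o.length := inner_length sp g 0 o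
      rw [PySem.List.pySetD_of_nonneg _ _ hx.1, List.getElem?_set]
      have hnx : x ∉ g := by
        intro h
        exact (List.nodup_append.1 hnd).2.2 x h x (by simp) rfl
      by_cases hxj : x.toNat = j
      · have hxj' : x = (j : Int) := by omega
        subst hxj'
        rw [if_pos hxj, if_pos (by rw [hlen]; omega), pvIdxOf_append_self _ _ hnx]
      · have hjg : (j : Int) ∈ g := by
          rcases List.mem_append.1 hmem with h | h
          · exact h
          · exfalso; apply hxj
            have : (j : Int) = x := by simpa using h
            omega
        rw [if_neg hxj,
          ih (fun i hi => hb i (List.mem_append_left _ hi)) (List.Nodup.of_append_left hnd) hjg,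
          List.idxOf_append_of_mem hjg]

lemma outer_untouched (sp : Int) (gs : List (List Int)) (o : List Int) (j : Nat)
    (hb : ∀ g ∈ gs, ∀ i ∈ g, 0 ≤ i) (hj : ∀ g ∈ gs, (j : Int) ∉ g) :
    ((gs.foldl
      (fun ports idxs =>
        (PySem.List.enumerate idxs).foldl
          (fun (ports : List Int) q => PySem.List.pySetD ports q.2 (sp + q.1)) ports) o))[j]?
      = o[j]? := by
  induction gs generalizing o with
  | nil => rfl
  | cons g gs ih =>
      rw [List.foldl_cons,
        ih _ (fun g' h => hb g' (List.mem_cons_of_mem _ h)) (fun g' h => hj g' (List.mem_cons_of_mem _ h)),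
        inner_untouched sp g 0 o j (fun i hi => hb g List.mem_cons_self i hi)
          (hj g List.mem_cons_self)]

lemma outer_length (sp : Int) (gs : List (List Int)) (o : List Int) :
    ((gs.foldl
      (fun ports idxs =>
        (PySem.List.enumerate idxs).foldl
          (fun (ports : List Int) q => PySem.List.pySetD ports q.2 (sp + q.1)) ports) o)).length
      = o.length := by
  induction gs generalizing o with
  | nil => rfl
  | cons g gs ih => rw [List.foldl_cons, ih, inner_length]

lemma map_ports_alt_eq_pvSpec (l : List String) (sp : Int) :
    map_ports_alt l sp = pvSpec l sp := by
  have hvals : (pvGroups l).values = (pvGroups l).keys.map (pvIdx l) := by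
    rw [PySem.Dict.values_eq_map_keys (pvGroups l) (pvGroups_keys_nodup l) []]
    exact List.map_congr_left (fun a _ => pvGroups_getD l a)
  have hlen : (pvSpec l sp).length = l.length := by
    simp [pvSpec, PySem.List.length_enumerate]
  apply List.ext_getElem?
  intro j
  by_cases hj : j < l.length
  case neg =>
    have h1 : (map_ports_alt l sp)[j]? = none := by
      apply List.getElem?_eq_none
      unfold map_ports_alt
      rw [outer_length]
      simpa using Nat.le_of_not_lt hj
    have h2 : (pvSpec l sp)[j]? = none := by
      apply List.getElem?_eq_none
      rw [hlen]
      exact Nat.le_of_not_lt hj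
    rw [h1, h2]
  case pos =>
    set a0 := l[j] with ha0
    -- decompose the key list around a0
    have hmem : a0 ∈ (pvGroups l).keys := (mem_pvGroups_keys l a0).2 (List.getElem_mem hj)
    obtain ⟨pre, post, hks⟩ := List.append_of_mem hmem
    have hnd : (pre ++ a0 :: post).Nodup := hks ▸ pvGroups_keys_nodup l
    have hpre : a0 ∉ pre := fun h => (List.nodup_append.1 hnd).2.2 a0 h a0 (by simp) rfl
    have hpost : a0 ∉ post := by
      have := (List.nodup_append.1 hnd).2.1
      simpa using (List.nodup_cons.1 this).1
    -- key fact: only a0's group contains index j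
    have honly : ∀ a : String, a ≠ a0 → ((j : Int)) ∉ pvIdx l a := by
      intro a hne hmem'
      exact hne (((natCast_mem_pvIdx l a j hj).1 hmem').symm ▸ rfl)
    have hbnds : ∀ a : String, ∀ i ∈ pvIdx l a, 0 ≤ i := by
      intro a i hi; exact (pvIdx_bounds l a i hi).1
    unfold map_ports_alt
    rw [hvals, hks, List.map_append, List.map_cons, List.foldl_append, List.foldl_cons]
    -- groups after a0's don't touch j
    rw [outer_untouched sp _ _ j
      (by rintro g hg i hi; rcases List.mem_map.1 hg with ⟨a, _, rfl⟩; exact hbnds a i hi)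
      (by rintro g hg; rcases List.mem_map.1 hg with ⟨a, hamem, rfl⟩
          exact honly a (fun h => hpost (h ▸ hamem)))]
    -- a0's group sets position j
    have hmidlen : ((pre.map (pvIdx l)).foldl
        (fun ports idxs =>
          (PySem.List.enumerate idxs).foldl
            (fun (ports : List Int) q => PySem.List.pySetD ports q.2 (sp + q.1)) ports)
        (List.replicate l.length 0)).length = l.length := by
      rw [outer_length]; simp
    rw [inner_get sp (pvIdx l a0) _ j
      (by intro i hi
          refine ⟨(pvIdx_bounds l a0 i hi).1, ?_⟩
          rw [hmidlen]; exact (pvIdx_bounds l a0 i hi).2)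
      (pvIdx_nodup l a0)
      ((natCast_mem_pvIdx l a0 j hj).2 rfl)]
    -- and pvSpec at j is the same value
    rw [pvIdx_idxOf l a0 j hj rfl]
    unfold pvSpec
    rw [List.getElem?_map, PySem.List.getElem?_enumerate]
    simp only [Option.map_map]
    rw [List.getElem?_eq_getElem hj]
    simp only [Option.map_some, Function.comp_apply, zero_add]
    rw [PySem.List.slice_to_natCast, PySem.List.count_eq]

-- ===== VERDICT (by name: the statement is the Claim_ definition above) =====
theorem map_ports_spec : Claim_equal_map_ports := by
  intro addresses start_port _
  unfold Spec_map_ports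
  rw [map_ports_eq_pvSpec, map_ports_alt_eq_pvSpec]
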